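-- pv_equiv track=rewrite | github.com/Actlam/train-hub | shikotama-web/practice03/js/adways/import sys.py | rec
-- ===== SOURCE A (Python) =====
-- def rec(rl,i):
--     res = rl[i]
--     i+=1
--     if i < len(rl):
--         res = res + rec(rl,i)
--     else:
--         pass
--     return res
-- ===== SOURCE B (Python) =====
-- def rec(rl, i):
--     res = rl[i]
--     for j in range(i + 1, len(rl)):
--         res = res + rl[j]
--     return res
-- ===== Notes on version B (the rewrite author's own statement) =====
-- stated objective: idiomatic
-- what changed: Replaces the suffix recursion with a single forward accumulation loop seeded with rl[i], iterating j from i+1 to len(rl)-1.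
import Mathlib
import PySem

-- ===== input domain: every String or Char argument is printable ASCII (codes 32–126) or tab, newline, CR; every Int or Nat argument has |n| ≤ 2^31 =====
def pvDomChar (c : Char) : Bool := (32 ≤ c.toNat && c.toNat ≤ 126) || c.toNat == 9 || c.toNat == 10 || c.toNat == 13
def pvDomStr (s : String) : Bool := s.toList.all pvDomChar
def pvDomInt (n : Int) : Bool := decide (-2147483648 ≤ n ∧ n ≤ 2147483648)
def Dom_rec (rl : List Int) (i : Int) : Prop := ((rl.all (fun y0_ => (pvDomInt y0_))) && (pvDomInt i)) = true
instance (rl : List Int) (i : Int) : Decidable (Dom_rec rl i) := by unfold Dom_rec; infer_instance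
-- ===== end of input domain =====

-- B replaces A's suffix recursion with a single forward accumulation loop (idiomatic; same cost).


-- ===== PORT A =====
-- rl[i] ported with pyGet? (Python negative-index semantics); the IndexError case is excluded by Pre_rec.
def rec (rl : List Int) (i : Int) : Int :=
  let res := (PySem.List.pyGet? rl i).getD 0
  if i + 1 < (rl.length : Int) then res + rec rl (i + 1) else res
termination_by ((rl.length : Int) - i).toNat
decreasing_by omega

-- ===== PORT B =====
def rec_alt (rl : List Int) (i : Int) : Int :=
  (PySem.List.pyRange (i + 1) (rl.length : Int) 1).foldl
    (fun res j => res + (PySem.List.pyGet? rl j).getD 0)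
    ((PySem.List.pyGet? rl i).getD 0)

-- ===== PRECONDITION & SPEC =====
-- Pre_rec: exactly the inputs where rl[i] does not raise IndexError (both programs raise outside it).
def Pre_rec (rl : List Int) (i : Int) : Prop := -(rl.length : Int) ≤ i ∧ i < (rl.length : Int)
instance (rl : List Int) (i : Int) : Decidable (Pre_rec rl i) := by unfold Pre_rec; infer_instance
def pvWitness_rec : List Int × Int := ([3, -1, 4], 1)

def Spec_rec (rl : List Int) (i : Int) (out : Int) : Prop := out = rec_alt rl i
instance (rl : List Int) (i : Int) (out : Int) : Decidable (Spec_rec rl i out) := by unfold Spec_rec; infer_instance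

-- ===== CLAIM (what is proved, stated in full; the proofs are below) =====
def Claim_equal_rec : Prop := ∀ (rl : List Int) (i : Int), Dom_rec rl i → Pre_rec rl i → Spec_rec rl i (rec rl i)

-- ===== LEMMAS AND PROOFS =====

-- Shifting the accumulator of B's additive fold.
theorem foldl_add_shift (l : List Int) (g : Int → Int) (c x : Int) :
    l.foldl (fun res j => res + g j) (c + x) = c + l.foldl (fun res j => res + g j) x := by
  induction l generalizing x with
  | nil => simp
  | cons a t ih => simpa [List.foldl, add_assoc] using ih (x + g a)

theorem rec_eq_alt (rl : List Int) (i : Int) : rec rl i = rec_alt rl i := by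
  rw [rec]
  by_cases h : i + 1 < (rl.length : Int)
  · rw [if_pos h, rec_eq_alt rl (i + 1)]
    unfold rec_alt
    rw [PySem.List.pyRange_one_cons h, List.foldl_cons, add_comm ((PySem.List.pyGet? rl i).getD 0),
      foldl_add_shift]
    exact add_comm _ _
  · rw [if_neg h]
    unfold rec_alt
    rw [PySem.List.pyRange_one_eq_nil (by omega), List.foldl_nil]
termination_by ((rl.length : Int) - i).toNat
decreasing_by omega

-- ===== VERDICT (by name: the statement is the Claim_ definition above) =====
theorem rec_spec : Claim_equal_rec := by
  intro rl i _ _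
  exact rec_eq_alt rl i
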